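-- pv_equiv track=rewrite | github.com/RasselJohn/AlgorithmExercises | src/15.py | get_summands
-- ===== SOURCE A (Python) =====
-- def get_summands(n):
--     """
--     >>> get_summands(1)
--     [1]
--     >>> get_summands(2)
--     [2]
--     >>> get_summands(7)
--     [1, 2, 4]
--     >>> get_summands(51)
--     [1, 2, 3, 4, 5, 6, 7, 8, 15]
--     >>> get_summands(777)
--     [1, 2, 3, 4, 5, 6, 7, 8, 9, 10, 11, 12, 13, 14, 15, 16, 17, 18, 19, 20, 21, 22, 23, 24, 25, 26, 27, 28, 29, 30, 31, 32, 33, 34, 35, 36, 37, 74]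
--     """
--     if n == 1 or n == 2:
--         return [n]
--
--     full_sum = 0
--     summands = []
--
--     for next_num in range(1, n):
--         curr_sum = full_sum + next_num
--
--         if curr_sum < n:
--             summands.append(next_num)
--             full_sum = curr_sum
--         elif curr_sum == n:
--             summands.append(next_num)
--             break
--         else:  # curr_sum > n
--             summands.append(summands.pop() + 1)
--
--             full_sum += 1
--             if full_sum == n:
--                 break
--
--     return summands
-- ===== SOURCE B (Python) =====
-- def _isqrt(m):
--     # integer Newton iteration; exact floor sqrt for m >= 1
--     if m <= 1:
--         return m
--     x = m // 2
--     while True: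
--         y = (x + m // x) // 2
--         if y < x:
--             x = y
--         else:
--             return x
--
--
-- def get_summands(n):
--     # distinct increasing summands of n: the naturals below k plus one adjusted last element
--     if n <= 0:
--         return []
--     k = (_isqrt(8 * n + 1) - 1) // 2   # largest k with k*(k+1)//2 <= n
--     t = k * (k + 1) // 2
--     return list(range(1, k)) + [k + (n - t)]
-- ===== Notes on version B (the rewrite author's own statement) =====
-- stated objective: alternative
-- what changed: Replaces the incremental append/pop-and-increment repair loop with a closed form: k is obtained from the integer square root of 8n+1 (Newton iteration), and the answer is built directly as the run of naturals below k plus one adjusted last element.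
import Mathlib
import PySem

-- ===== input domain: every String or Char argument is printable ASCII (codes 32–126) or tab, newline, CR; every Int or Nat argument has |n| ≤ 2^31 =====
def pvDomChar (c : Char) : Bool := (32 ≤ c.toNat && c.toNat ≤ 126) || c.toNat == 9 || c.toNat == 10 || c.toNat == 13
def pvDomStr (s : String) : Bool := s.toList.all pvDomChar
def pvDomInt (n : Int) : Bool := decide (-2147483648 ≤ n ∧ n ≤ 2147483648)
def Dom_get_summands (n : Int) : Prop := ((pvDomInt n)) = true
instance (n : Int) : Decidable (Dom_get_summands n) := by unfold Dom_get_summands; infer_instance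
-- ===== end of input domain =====

-- B replaces A's incremental append/pop-and-increment repair loop by a closed form: k from the
-- integer square root of 8n+1 (Newton iteration), then the naturals below k plus one adjusted last element.

-- ===== PORT A =====
-- the for-loop of A over range(1, n): state (full_sum, summands), with break modelled by returning
def getSummandsLoop (n : Int) : List Int → Int → List Int → List Int
  | [], _, summands => summands
  | next :: rest, full, summands =>
    let curr := full + next
    if curr < n then getSummandsLoop n rest curr (summands ++ [next])
    else if curr = n then summands ++ [next]
    else
      -- summands.append(summands.pop() + 1); Python's pop() raises IndexError on an empty list,
      -- but this branch is reachable only with a nonempty summands (first iteration appends), so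
      -- the 'none' arm below is dead code for every Int n
      match PySem.List.pop? summands with
      | none => summands
      | some (last, rst) =>
        let summands' := rst ++ [last + 1]
        let full' := full + 1
        if full' = n then summands' else getSummandsLoop n rest full' summands'

def get_summands (n : Int) : List Int :=
  if n = 1 ∨ n = 2 then [n]
  else getSummandsLoop n (PySem.List.pyRange 1 n 1) 0 []

-- ===== PORT B =====
-- the 'while True' Newton loop of _isqrt; fuel m.toNat bounds the iteration count (x starts at
-- m//2 and strictly decreases while staying ≥ 1 for m ≥ 2, so at most m steps happen)
def newtonLoop (m : Int) : Nat → Int → Int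
  | 0, x => x
  | fuel + 1, x =>
    let y := PySem.Int.floordiv (x + PySem.Int.floordiv m x) 2
    if y < x then newtonLoop m fuel y else x

def isqrtB (m : Int) : Int :=
  if m ≤ 1 then m else newtonLoop m m.toNat (PySem.Int.floordiv m 2)

def get_summands_alt (n : Int) : List Int :=
  if n ≤ 0 then []
  else
    let k := PySem.Int.floordiv (isqrtB (8 * n + 1) - 1) 2
    let t := PySem.Int.floordiv (k * (k + 1)) 2
    PySem.List.pyRange 1 k 1 ++ [k + (n - t)]

-- ===== PRECONDITION & SPEC =====
def Spec_get_summands (n : Int) (out : List Int) : Prop := out = get_summands_alt n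
instance (n : Int) (out : List Int) : Decidable (Spec_get_summands n out) := by unfold Spec_get_summands; infer_instance

-- ===== CLAIM (what is proved, stated in full; the proofs are below) =====
def Claim_equal_get_summands : Prop := ∀ (n : Int), Dom_get_summands n → Spec_get_summands n (get_summands n)

-- ===== LEMMAS AND PROOFS =====

-- Newton invariant: with x ≥ 1, (x+1)² > m and enough fuel, the loop returns ⌊√m⌋
theorem newtonLoop_correct (fuel : Nat) : ∀ (m x : Int), 2 ≤ m → 1 ≤ x →
    m < (x + 1) * (x + 1) → x.toNat ≤ fuel →
    1 ≤ newtonLoop m fuel x ∧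
      newtonLoop m fuel x * newtonLoop m fuel x ≤ m ∧
      m < (newtonLoop m fuel x + 1) * (newtonLoop m fuel x + 1) := by
  induction fuel with
  | zero => intro m x hm hx _ hfuel; omega
  | succ fuel ih =>
    intro m x hm hx hinv hfuel
    have hxpos : (0:Int) < x := by omega
    have hq : PySem.Int.floordiv m x = m / x := PySem.Int.floordiv_eq_ediv_of_pos hxpos
    have hdm : x * (m / x) + m % x = m := Int.mul_ediv_add_emod m x
    have hr0 : 0 ≤ m % x := Int.emod_nonneg m (by omega)
    have hrx : m % x < x := Int.emod_lt_of_pos m hxpos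
    have hq0 : 0 ≤ m / x := Int.ediv_nonneg (by omega) (by omega)
    set q := m / x with hqdef
    set r := m % x with hrdef
    set y := PySem.Int.floordiv (x + PySem.Int.floordiv m x) 2 with hydef
    have hy2 : 2 * y ≤ x + q ∧ x + q ≤ 2 * y + 1 := by
      rw [hydef, hq, PySem.Int.floordiv_eq_ediv_of_pos (by omega : (0:Int) < 2)]
      omega
    -- (y+1)² > m
    have hkey : m < (y + 1) * (y + 1) := by nlinarith [sq_nonneg (x - q - 1), sq_nonneg (x + q + 1 - 2 * (y + 1))]
    have hy0 : 0 ≤ y := by omega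
    simp only [newtonLoop]
    rw [← hydef]
    by_cases hlt : y < x
    · rw [if_pos hlt]
      have hy1 : 1 ≤ y := by nlinarith
      exact ih m y hm hy1 hkey (by omega)
    · rw [if_neg hlt]
      refine ⟨hx, ?_, hinv⟩
      have hqx : x ≤ q := by omega
      nlinarith

theorem isqrtB_correct (m : Int) (hm : 2 ≤ m) :
    1 ≤ isqrtB m ∧ isqrtB m * isqrtB m ≤ m ∧ m < (isqrtB m + 1) * (isqrtB m + 1) := by
  have h2 : (0:Int) < 2 := by omega
  have hx0 : PySem.Int.floordiv m 2 = m / 2 := PySem.Int.floordiv_eq_ediv_of_pos h2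
  unfold isqrtB
  rw [if_neg (by omega)]
  apply newtonLoop_correct
  · exact hm
  · rw [hx0]; omega
  · rw [hx0]
    have h1 : 2 * (m / 2) ≤ m ∧ m ≤ 2 * (m / 2) + 1 := by omega
    nlinarith
  · rw [hx0]; omega

-- B's closed form: for n ≥ 1 it returns [1..k-1] ++ [k + (n - t)] for the unique triangular
-- breakpoint k (t = k(k+1)/2 ≤ n < t + k + 1)
theorem alt_char (n : Int) (hn : 1 ≤ n) :
    ∃ k t : Int, 1 ≤ k ∧ 2 * t = k * (k + 1) ∧ t ≤ n ∧ n < t + k + 1 ∧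
      get_summands_alt n = PySem.List.pyRange 1 k 1 ++ [k + (n - t)] := by
  have hm : (2:Int) ≤ 8 * n + 1 := by omega
  obtain ⟨hr1, hrle, hrlt⟩ := isqrtB_correct (8 * n + 1) hm
  set r := isqrtB (8 * n + 1) with hrdef
  have hr3 : 3 ≤ r := by nlinarith
  set k := PySem.Int.floordiv (r - 1) 2 with hkdef
  have hk2 : 2 * k ≤ r - 1 ∧ r - 1 ≤ 2 * k + 1 := by
    rw [hkdef, PySem.Int.floordiv_eq_ediv_of_pos (by omega : (0:Int) < 2)]; omega
  have hk1 : 1 ≤ k := by omega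
  set t := PySem.Int.floordiv (k * (k + 1)) 2 with htdef
  obtain ⟨c, hc⟩ := Int.even_mul_succ_self k
  have ht2 : 2 * t = k * (k + 1) := by
    rw [htdef, PySem.Int.floordiv_eq_ediv_of_pos (by omega : (0:Int) < 2)]
    omega
  refine ⟨k, t, hk1, ht2, ?_, ?_, ?_⟩
  · -- t ≤ n from (2k+1)² ≤ r² ≤ 8n+1
    nlinarith
  · -- n < t + k + 1 from 8n+1 < (r+1)² ≤ (2k+3)²
    nlinarith
  · unfold get_summands_alt
    rw [if_neg (by omega)]

-- the breakpoint (k, t) is unique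
theorem char_unique (n k t k' t' : Int) (hk : 1 ≤ k) (ht : 2 * t = k * (k + 1))
    (h1 : t ≤ n) (h2 : n < t + k + 1) (hk' : 1 ≤ k') (ht' : 2 * t' = k' * (k' + 1))
    (h1' : t' ≤ n) (h2' : n < t' + k' + 1) : k = k' ∧ t = t' := by
  have : k = k' := by
    rcases lt_trichotomy k k' with h | h | h
    · exfalso; nlinarith
    · exact h
    · exfalso; nlinarith
  subst this
  exact ⟨rfl, by omega⟩

-- repair phase: summands = [1..j-1, j+c], full = t+c; each step pops and re-appends +1 until full = n
theorem loop_repair (fuel : Nat) : ∀ (n j t c : Int), 3 ≤ n → 2 ≤ j → 2 * t = j * (j + 1) →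
    t < n → n < t + j + 1 → 1 ≤ c → t + c < n → (n - (t + c)).toNat ≤ fuel →
    getSummandsLoop n (PySem.List.pyRange (j + 1 + c) n 1) (t + c)
        (PySem.List.pyRange 1 j 1 ++ [j + c]) =
      PySem.List.pyRange 1 j 1 ++ [j + (n - t)] := by
  induction fuel with
  | zero => intro n j t c _ _ _ _ _ _ h hf; omega
  | succ fuel ih =>
    intro n j t c hn hj ht htn hntj hc htc hf
    have htj : j + 1 ≤ t := by nlinarith
    have hlt : j + 1 + c < n := by omega
    rw [PySem.List.pyRange_one_cons hlt]
    simp only [getSummandsLoop]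
    rw [if_neg (by omega), if_neg (by omega), PySem.List.pop?_last]
    dsimp only
    by_cases hend : t + c + 1 = n
    · rw [if_pos hend]
      have : j + c + 1 = j + (n - t) := by omega
      rw [this]
    · rw [if_neg hend]
      have h1 : t + c + 1 = t + (c + 1) := by ring
      have h2 : j + 1 + c + 1 = j + 1 + (c + 1) := by ring
      have h3 : j + c + 1 = j + (c + 1) := by ring
      rw [h1, h2, h3]
      exact ih n j t (c + 1) hn hj ht htn hntj (by omega) (by omega) (by omega)

-- growth phase: summands = [1..j], full = t = j(j+1)/2 < n; the loop ends up at B's closed form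
theorem loop_growth (fuel : Nat) : ∀ (n j t : Int), 3 ≤ n → 1 ≤ j → 2 * t = j * (j + 1) →
    t < n → (n - j).toNat ≤ fuel →
    getSummandsLoop n (PySem.List.pyRange (j + 1) n 1) t (PySem.List.pyRange 1 (j + 1) 1) =
      get_summands_alt n := by
  induction fuel with
  | zero =>
    intro n j t hn hj ht htn hf
    have : j ≤ t := by nlinarith
    omega
  | succ fuel ih =>
    intro n j t hn hj ht htn hf
    have hjt : j ≤ t := by nlinarith
    have hjn : j + 1 < n := by
      rcases lt_or_ge (j + 1) n with h | h
      · exact h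
      · exfalso
        have : t = j := by omega
        nlinarith
    rw [PySem.List.pyRange_one_cons hjn]
    simp only [getSummandsLoop]
    obtain ⟨k, t', hk1, ht2', h1', h2', halt⟩ := alt_char n (by omega)
    by_cases hlt : t + (j + 1) < n
    · rw [if_pos hlt]
      have : PySem.List.pyRange 1 (j + 1) 1 ++ [j + 1] = PySem.List.pyRange 1 (j + 1 + 1) 1 :=
        (PySem.List.pyRange_one_succ_right (by omega)).symm
      rw [this]
      exact ih n (j + 1) (t + (j + 1)) hn (by omega) (by ring_nf; linarith [ht]) hlt (by omega)
    · rw [if_neg hlt]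
      by_cases heq : t + (j + 1) = n
      · rw [if_pos heq]
        obtain ⟨hkk, htt⟩ := char_unique n (j + 1) (t + (j + 1)) k t' (by omega)
          (by nlinarith) (by omega) (by omega) hk1 ht2' h1' h2'
        rw [halt, ← hkk, ← htt]
        have : j + 1 + (n - (t + (j + 1))) = j + 1 := by omega
        rw [this]
      · rw [if_neg heq]
        -- repair case: t < n < t + j + 1, so k = j, t' = t
        have hj2 : 2 ≤ j := by
          by_contra h
          have : j = 1 := by omega
          subst this
          have : t = 1 := by omega
          omega
        have hbound : n < t + j + 1 := by omega
        obtain ⟨hkk, htt⟩ := char_unique n j t k t' (by omega) ht (by omega) hbound hk1 ht2' h1' h2'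
        rw [PySem.List.pyRange_one_succ_right (by omega : (1:Int) ≤ j), PySem.List.pop?_last]
        dsimp only
        by_cases hend : t + 1 = n
        · rw [if_pos hend]
          rw [halt, ← hkk, ← htt]
          have : j + (n - t) = j + 1 := by omega
          rw [this]
        · rw [if_neg hend]
          have h1 : t + 1 = t + (1:Int) := rfl
          have h2 : j + 1 + 1 = j + 1 + (1:Int) := rfl
          rw [halt, ← hkk, ← htt]
          exact loop_repair fuel n j t 1 hn hj2 ht (by omega) hbound (by omega) (by omega) (by omega)

-- ===== VERDICT (by name: the statement is the Claim_ definition above) =====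
theorem get_summands_spec : Claim_equal_get_summands := by
  unfold Claim_equal_get_summands
  intro n _
  unfold Spec_get_summands
  by_cases h12 : n = 1 ∨ n = 2
  · rcases h12 with h | h <;> subst h <;> decide
  · unfold get_summands
    rw [if_neg h12]
    rcases le_or_gt n 0 with hn | hn
    · rw [PySem.List.pyRange_one_eq_nil (by omega)]
      unfold get_summands_alt
      rw [if_pos hn]
      simp [getSummandsLoop]
    · have hn3 : 3 ≤ n := by omega
      rw [PySem.List.pyRange_one_cons (by omega : (1:Int) < n)]
      simp only [getSummandsLoop]
      rw [if_pos (by omega : (0:Int) + 1 < n)]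
      have e1 : (0:Int) + 1 = 1 := by norm_num
      have e2 : ([] : List Int) ++ [1] = PySem.List.pyRange 1 (1 + 1) 1 := by decide
      rw [e1, e2]
      have := loop_growth (n - 1).toNat n 1 1 hn3 (by omega) (by norm_num) (by omega) (by omega)
      exact this
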